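-- pv_equiv track=rewrite | github.com/withNoclout/LeetCode-Med | quiz_minNumberoffrog.py | minNumberOfFrogs
-- ===== SOURCE A (Python) =====
-- def minNumberOfFrogs(croakOfFrogs):
--     """
--     :type croakOfFrogs: str
--     :rtype: int
--     """
--     seq = "croak"
--     count = {ch: 0 for ch in seq}
--     frogs, max_frogs = 0, 0
--
--     for ch in croakOfFrogs:
--         if ch == 'c':
--             count['c'] += 1
--             frogs += 1
--             max_frogs = max(max_frogs, frogs)
--         elif ch == 'r':
--             if count['c'] == 0: return -1
--             count['c'] -= 1
--             count['r'] += 1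
--         elif ch == 'o':
--             if count['r'] == 0: return -1
--             count['r'] -= 1
--             count['o'] += 1
--         elif ch == 'a':
--             if count['o'] == 0: return -1
--             count['o'] -= 1
--             count['a'] += 1
--         elif ch == 'k':
--             if count['a'] == 0: return -1
--             count['a'] -= 1
--             frogs -= 1
--         else:
--             return -1  # invalid character
--
--     # After processing, all counts should be zero
--     if any(count[ch] != 0 for ch in "croa"):
--         return -1
--
--     return max_frogs
-- ===== SOURCE B (Python) =====
-- def minNumberOfFrogs(croakOfFrogs):
--     s = croakOfFrogs
--     # pass 0: any character outside the alphabet makes the string invalid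
--     if any(ch not in 'croak' for ch in s):
--         return -1
--
--     # a valid interleaving is exactly: for each adjacent letter pair (x, y) of
--     # "croak", every prefix has at least as many x as y, and the totals match
--     def dominates(x, y):
--         bal = 0
--         for ch in s:
--             if ch == x:
--                 bal += 1
--             elif ch == y:
--                 bal -= 1
--                 if bal < 0:
--                     return False
--         return bal == 0
--
--     if not dominates('c', 'r'): return -1
--     if not dominates('r', 'o'): return -1
--     if not dominates('o', 'a'): return -1
--     if not dominates('a', 'k'): return -1
--
--     # final pass: the answer is the maximum number of croaks open at once,
--     # i.e. the maximum prefix sum of (+1 for 'c', -1 for 'k')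
--     best = cur = 0
--     for ch in s:
--         if ch == 'c':
--             cur += 1
--             if cur > best:
--                 best = cur
--         elif ch == 'k':
--             cur -= 1
--     return best
-- ===== Notes on version B (the rewrite author's own statement) =====
-- stated objective: alternative
-- what changed: Replaces A's single pass with five coupled in-flight stage counters and per-letter transfer branches by six independent full passes: one alphabet check, four pairwise balance passes (one per adjacent letter pair of 'croak', each maintaining a single prefix balance that must stay nonnegative and end at zero), and a final max-prefix-sum pass over open/close events (first and last letters) that yields the answer.
import Mathlib
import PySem

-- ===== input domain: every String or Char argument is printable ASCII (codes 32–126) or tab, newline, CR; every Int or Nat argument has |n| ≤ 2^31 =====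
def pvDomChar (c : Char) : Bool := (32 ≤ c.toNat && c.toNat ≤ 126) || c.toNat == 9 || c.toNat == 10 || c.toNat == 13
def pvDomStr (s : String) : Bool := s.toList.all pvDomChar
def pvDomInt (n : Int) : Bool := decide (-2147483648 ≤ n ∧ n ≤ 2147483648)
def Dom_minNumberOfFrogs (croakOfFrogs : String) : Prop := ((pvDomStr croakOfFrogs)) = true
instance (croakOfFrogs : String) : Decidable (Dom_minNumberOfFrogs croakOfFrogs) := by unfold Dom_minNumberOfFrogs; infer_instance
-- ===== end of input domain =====

-- B replaces A's single pass with five coupled stage counters by six independent passes: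
-- an alphabet check, four pairwise prefix-balance passes, and a max-prefix-sum pass (alternative decomposition).
set_option maxRecDepth 4000


-- ===== PORT A =====
-- the loop of A: state = the dict `count`, `frogs`, `max_frogs`; early `return -1` = result -1
def frogLoopA (count : PySem.Dict Char Int) (frogs maxf : Int) : List Char → Int
  | [] =>
      -- "if any(count[ch] != 0 for ch in "croa"): return -1 / return max_frogs"
      if ['c', 'r', 'o', 'a'].any (fun ch => count.getD ch 0 != 0) then -1 else maxf
  | ch :: rest =>
      if ch = 'c' then
        frogLoopA (count.modify 'c' 0 (· + 1)) (frogs + 1) (max maxf (frogs + 1)) rest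
      else if ch = 'r' then
        if count.getD 'c' 0 = 0 then -1
        else frogLoopA ((count.modify 'c' 0 (· - 1)).modify 'r' 0 (· + 1)) frogs maxf rest
      else if ch = 'o' then
        if count.getD 'r' 0 = 0 then -1
        else frogLoopA ((count.modify 'r' 0 (· - 1)).modify 'o' 0 (· + 1)) frogs maxf rest
      else if ch = 'a' then
        if count.getD 'o' 0 = 0 then -1
        else frogLoopA ((count.modify 'o' 0 (· - 1)).modify 'a' 0 (· + 1)) frogs maxf rest
      else if ch = 'k' then
        if count.getD 'a' 0 = 0 then -1
        else frogLoopA (count.modify 'a' 0 (· - 1)) (frogs - 1) maxf rest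
      else -1

def minNumberOfFrogs (croakOfFrogs : String) : Int :=
  frogLoopA (PySem.Dict.ofList [('c', 0), ('r', 0), ('o', 0), ('a', 0), ('k', 0)]) 0 0
    croakOfFrogs.toList

-- ===== PORT B =====
-- Source B's `dominates(x, y)`: one pass keeping the single balance #x - #y of the prefix
def frogDominates (x y : Char) : List Char → Int → Bool
  | [], bal => bal == 0
  | ch :: rest, bal =>
      if ch = x then frogDominates x y rest (bal + 1)
      else if ch = y then
        if bal - 1 < 0 then false else frogDominates x y rest (bal - 1)
      else frogDominates x y rest bal

-- Source B's final pass: maximum prefix sum of +1 (on 'c') / -1 (on 'k')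
def frogMaxPass : List Char → Int → Int → Int
  | [], _, best => best
  | ch :: rest, cur, best =>
      if ch = 'c' then frogMaxPass rest (cur + 1) (if cur + 1 > best then cur + 1 else best)
      else if ch = 'k' then frogMaxPass rest (cur - 1) best
      else frogMaxPass rest cur best

def minNumberOfFrogs_alt (croakOfFrogs : String) : Int :=
  -- `ch not in 'croak'` on a single char = non-membership in its character list
  if croakOfFrogs.toList.any (fun ch => !(['c', 'r', 'o', 'a', 'k'].contains ch)) then -1
  else if !(frogDominates 'c' 'r' croakOfFrogs.toList 0) then -1
  else if !(frogDominates 'r' 'o' croakOfFrogs.toList 0) then -1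
  else if !(frogDominates 'o' 'a' croakOfFrogs.toList 0) then -1
  else if !(frogDominates 'a' 'k' croakOfFrogs.toList 0) then -1
  else frogMaxPass croakOfFrogs.toList 0 0

-- ===== PRECONDITION & SPEC =====
def Spec_minNumberOfFrogs (croakOfFrogs : String) (out : Int) : Prop := out = minNumberOfFrogs_alt croakOfFrogs
instance (croakOfFrogs : String) (out : Int) : Decidable (Spec_minNumberOfFrogs croakOfFrogs out) := by unfold Spec_minNumberOfFrogs; infer_instance

-- ===== CLAIM (what is proved, stated in full; the proofs are below) =====
def Claim_equal_minNumberOfFrogs : Prop := ∀ (croakOfFrogs : String), Dom_minNumberOfFrogs croakOfFrogs → Spec_minNumberOfFrogs croakOfFrogs (minNumberOfFrogs croakOfFrogs)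

-- ===== LEMMAS AND PROOFS =====

-- one-step evaluation lemmas for B's passes
lemma any_step (ch : Char) (h : ch ∈ ['c', 'r', 'o', 'a', 'k'])
    (rest : List Char) :
    ((ch :: rest).any (fun c => !(['c', 'r', 'o', 'a', 'k'].contains c)))
      = rest.any (fun c => !(['c', 'r', 'o', 'a', 'k'].contains c)) := by
  fin_cases h <;> simp

lemma any_bad (ch : Char) (h : ch ∉ ['c', 'r', 'o', 'a', 'k'])
    (rest : List Char) :
    ((ch :: rest).any (fun c => !(['c', 'r', 'o', 'a', 'k'].contains c))) = true := by
  simp only [List.mem_cons, not_or] at h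
  simp [List.any_cons]
  tauto

lemma dom_step_x (x y : Char) (rest : List Char) (bal : Int) :
    frogDominates x y (x :: rest) bal = frogDominates x y rest (bal + 1) := by
  simp [frogDominates]

lemma dom_step_y (x y : Char) (h : y ≠ x) (rest : List Char) (bal : Int) :
    frogDominates x y (y :: rest) bal
      = if bal - 1 < 0 then false else frogDominates x y rest (bal - 1) := by
  simp [frogDominates, h]

lemma dom_step_o (x y ch : Char) (h1 : ch ≠ x) (h2 : ch ≠ y) (rest : List Char) (bal : Int) :
    frogDominates x y (ch :: rest) bal = frogDominates x y rest bal := by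
  simp [frogDominates, h1, h2]

lemma max_step_c (rest : List Char) (cur best : Int) :
    frogMaxPass ('c' :: rest) cur best
      = frogMaxPass rest (cur + 1) (if cur + 1 > best then cur + 1 else best) := by
  simp [frogMaxPass]

lemma max_step_k (rest : List Char) (cur best : Int) :
    frogMaxPass ('k' :: rest) cur best = frogMaxPass rest (cur - 1) best := by
  simp [frogMaxPass]

lemma max_step_o (ch : Char) (h1 : ch ≠ 'c') (h2 : ch ≠ 'k') (rest : List Char)
    (cur best : Int) :
    frogMaxPass (ch :: rest) cur best = frogMaxPass rest cur best := by
  simp [frogMaxPass, h1, h2]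

-- main invariant: A's in-flight counters for the processed prefix are the four pairwise
-- balances a,b,c,d carried by B's passes, A's `frogs` is their sum, and A's result on the
-- remaining suffix equals the chain of B's passes on that suffix from those balances.
lemma loop_eq : ∀ (l : List Char) (dct : PySem.Dict Char Int) (a b c d mx : Int),
    dct.getD 'c' 0 = a → dct.getD 'r' 0 = b → dct.getD 'o' 0 = c → dct.getD 'a' 0 = d →
    0 ≤ a → 0 ≤ b → 0 ≤ c → 0 ≤ d → a + b + c + d ≤ mx →
    frogLoopA dct (a + b + c + d) mx l =
      (if l.any (fun ch => !(['c', 'r', 'o', 'a', 'k'].contains ch)) then -1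
       else if !(frogDominates 'c' 'r' l a) then -1
       else if !(frogDominates 'r' 'o' l b) then -1
       else if !(frogDominates 'o' 'a' l c) then -1
       else if !(frogDominates 'a' 'k' l d) then -1
       else frogMaxPass l (a + b + c + d) mx) := by
  intro l
  induction l with
  | nil =>
    intro dct a b c d mx ga gb gc gd ha hb hc hd hmx
    simp only [frogLoopA, frogDominates, frogMaxPass, List.any_cons, List.any_nil,
      ga, gb, gc, gd]
    split_ifs <;> simp_all
  | cons ch rest ih =>
    intro dct a b c d mx ga gb gc gd ha hb hc hd hmx
    by_cases h1 : ch = 'c'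
    · subst h1
      have e1 : (dct.modify 'c' 0 (· + 1)).getD 'c' 0 = a + 1 := by
        rw [PySem.Dict.getD_modify_self, ga]
      have e2 : (dct.modify 'c' 0 (· + 1)).getD 'r' 0 = b := by
        rw [PySem.Dict.getD_modify_of_ne]; exact gb; decide
      have e3 : (dct.modify 'c' 0 (· + 1)).getD 'o' 0 = c := by
        rw [PySem.Dict.getD_modify_of_ne]; exact gc; decide
      have e4 : (dct.modify 'c' 0 (· + 1)).getD 'a' 0 = d := by
        rw [PySem.Dict.getD_modify_of_ne]; exact gd; decide
      simp only [frogLoopA]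
      rw [any_step 'c' (by decide), dom_step_x 'c' 'r',
        dom_step_o 'r' 'o' 'c' (by decide) (by decide),
        dom_step_o 'o' 'a' 'c' (by decide) (by decide),
        dom_step_o 'a' 'k' 'c' (by decide) (by decide), max_step_c]
      have h := ih (dct.modify 'c' 0 (· + 1)) (a + 1) b c d
        (if a + b + c + d + 1 > mx then a + b + c + d + 1 else mx)
        e1 e2 e3 e4 (by omega) hb hc hd (by split_ifs <;> omega)
      rw [show (max mx (a + b + c + d + 1) : Int)
            = (if a + b + c + d + 1 > mx then a + b + c + d + 1 else mx) from by
          split_ifs <;> omega]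
      rw [show (a + b + c + d + 1 : Int) = (a + 1) + b + c + d from by ring] at h ⊢
      exact h
    by_cases h2 : ch = 'r'
    · subst h2
      simp only [frogLoopA, if_neg (by decide : ¬ ('r' = 'c')), ga]
      rw [any_step 'r' (by decide), dom_step_y 'c' 'r' (by decide),
        dom_step_x 'r' 'o',
        dom_step_o 'o' 'a' 'r' (by decide) (by decide),
        dom_step_o 'a' 'k' 'r' (by decide) (by decide),
        max_step_o 'r' (by decide) (by decide)]
      by_cases hz : a = 0
      · subst hz
        rw [if_pos rfl, if_pos (by norm_num : (0 : Int) - 1 < 0)]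
        simp
      · rw [if_neg hz, if_neg (show ¬ ((a : Int) - 1 < 0) from by omega)]
        have e1 : ((dct.modify 'c' 0 (· - 1)).modify 'r' 0 (· + 1)).getD 'c' 0 = a - 1 := by
          rw [PySem.Dict.getD_modify_of_ne, PySem.Dict.getD_modify_self, ga]; decide
        have e2 : ((dct.modify 'c' 0 (· - 1)).modify 'r' 0 (· + 1)).getD 'r' 0 = b + 1 := by
          rw [PySem.Dict.getD_modify_self, PySem.Dict.getD_modify_of_ne]
          · rw [gb]
          · decide
        have e3 : ((dct.modify 'c' 0 (· - 1)).modify 'r' 0 (· + 1)).getD 'o' 0 = c := by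
          rw [PySem.Dict.getD_modify_of_ne, PySem.Dict.getD_modify_of_ne]
          · exact gc
          · decide
          · decide
        have e4 : ((dct.modify 'c' 0 (· - 1)).modify 'r' 0 (· + 1)).getD 'a' 0 = d := by
          rw [PySem.Dict.getD_modify_of_ne, PySem.Dict.getD_modify_of_ne]
          · exact gd
          · decide
          · decide
        have h := ih ((dct.modify 'c' 0 (· - 1)).modify 'r' 0 (· + 1)) (a - 1) (b + 1) c d mx
          e1 e2 e3 e4 (by omega) (by omega) hc hd (by omega)
        rw [show ((a - 1) + (b + 1) + c + d : Int) = a + b + c + d from by ring] at h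
        exact h
    by_cases h3 : ch = 'o'
    · subst h3
      simp only [frogLoopA, if_neg (by decide : ¬ ('o' = 'c')),
        if_neg (by decide : ¬ ('o' = 'r')), gb]
      rw [any_step 'o' (by decide),
        dom_step_o 'c' 'r' 'o' (by decide) (by decide),
        dom_step_y 'r' 'o' (by decide), dom_step_x 'o' 'a',
        dom_step_o 'a' 'k' 'o' (by decide) (by decide),
        max_step_o 'o' (by decide) (by decide)]
      by_cases hz : b = 0
      · subst hz
        rw [if_pos rfl, if_pos (by norm_num : (0 : Int) - 1 < 0)]
        simp
      · rw [if_neg hz, if_neg (show ¬ ((b : Int) - 1 < 0) from by omega)]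
        have e1 : ((dct.modify 'r' 0 (· - 1)).modify 'o' 0 (· + 1)).getD 'c' 0 = a := by
          rw [PySem.Dict.getD_modify_of_ne, PySem.Dict.getD_modify_of_ne]
          · exact ga
          · decide
          · decide
        have e2 : ((dct.modify 'r' 0 (· - 1)).modify 'o' 0 (· + 1)).getD 'r' 0 = b - 1 := by
          rw [PySem.Dict.getD_modify_of_ne, PySem.Dict.getD_modify_self, gb]; decide
        have e3 : ((dct.modify 'r' 0 (· - 1)).modify 'o' 0 (· + 1)).getD 'o' 0 = c + 1 := by
          rw [PySem.Dict.getD_modify_self, PySem.Dict.getD_modify_of_ne]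
          · rw [gc]
          · decide
        have e4 : ((dct.modify 'r' 0 (· - 1)).modify 'o' 0 (· + 1)).getD 'a' 0 = d := by
          rw [PySem.Dict.getD_modify_of_ne, PySem.Dict.getD_modify_of_ne]
          · exact gd
          · decide
          · decide
        have h := ih ((dct.modify 'r' 0 (· - 1)).modify 'o' 0 (· + 1)) a (b - 1) (c + 1) d mx
          e1 e2 e3 e4 ha (by omega) (by omega) hd (by omega)
        rw [show (a + (b - 1) + (c + 1) + d : Int) = a + b + c + d from by ring] at h
        exact h
    by_cases h4 : ch = 'a'
    · subst h4
      simp only [frogLoopA, if_neg (by decide : ¬ ('a' = 'c')),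
        if_neg (by decide : ¬ ('a' = 'r')), if_neg (by decide : ¬ ('a' = 'o')),
        gc]
      rw [any_step 'a' (by decide),
        dom_step_o 'c' 'r' 'a' (by decide) (by decide),
        dom_step_o 'r' 'o' 'a' (by decide) (by decide),
        dom_step_y 'o' 'a' (by decide), dom_step_x 'a' 'k',
        max_step_o 'a' (by decide) (by decide)]
      by_cases hz : c = 0
      · subst hz
        rw [if_pos rfl, if_pos (by norm_num : (0 : Int) - 1 < 0)]
        simp
      · rw [if_neg hz, if_neg (show ¬ ((c : Int) - 1 < 0) from by omega)]
        have e1 : ((dct.modify 'o' 0 (· - 1)).modify 'a' 0 (· + 1)).getD 'c' 0 = a := by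
          rw [PySem.Dict.getD_modify_of_ne, PySem.Dict.getD_modify_of_ne]
          · exact ga
          · decide
          · decide
        have e2 : ((dct.modify 'o' 0 (· - 1)).modify 'a' 0 (· + 1)).getD 'r' 0 = b := by
          rw [PySem.Dict.getD_modify_of_ne, PySem.Dict.getD_modify_of_ne]
          · exact gb
          · decide
          · decide
        have e3 : ((dct.modify 'o' 0 (· - 1)).modify 'a' 0 (· + 1)).getD 'o' 0 = c - 1 := by
          rw [PySem.Dict.getD_modify_of_ne, PySem.Dict.getD_modify_self, gc]; decide
        have e4 : ((dct.modify 'o' 0 (· - 1)).modify 'a' 0 (· + 1)).getD 'a' 0 = d + 1 := by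
          rw [PySem.Dict.getD_modify_self, PySem.Dict.getD_modify_of_ne]
          · rw [gd]
          · decide
        have h := ih ((dct.modify 'o' 0 (· - 1)).modify 'a' 0 (· + 1)) a b (c - 1) (d + 1) mx
          e1 e2 e3 e4 ha hb (by omega) (by omega) (by omega)
        rw [show (a + b + (c - 1) + (d + 1) : Int) = a + b + c + d from by ring] at h
        exact h
    by_cases h5 : ch = 'k'
    · subst h5
      simp only [frogLoopA, if_neg (by decide : ¬ ('k' = 'c')),
        if_neg (by decide : ¬ ('k' = 'r')), if_neg (by decide : ¬ ('k' = 'o')),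
        if_neg (by decide : ¬ ('k' = 'a')), gd]
      rw [any_step 'k' (by decide),
        dom_step_o 'c' 'r' 'k' (by decide) (by decide),
        dom_step_o 'r' 'o' 'k' (by decide) (by decide),
        dom_step_o 'o' 'a' 'k' (by decide) (by decide),
        dom_step_y 'a' 'k' (by decide), max_step_k]
      by_cases hz : d = 0
      · subst hz
        rw [if_pos rfl, if_pos (by norm_num : (0 : Int) - 1 < 0)]
        simp
      · rw [if_neg hz, if_neg (show ¬ ((d : Int) - 1 < 0) from by omega)]
        have e1 : (dct.modify 'a' 0 (· - 1)).getD 'c' 0 = a := by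
          rw [PySem.Dict.getD_modify_of_ne]; exact ga; decide
        have e2 : (dct.modify 'a' 0 (· - 1)).getD 'r' 0 = b := by
          rw [PySem.Dict.getD_modify_of_ne]; exact gb; decide
        have e3 : (dct.modify 'a' 0 (· - 1)).getD 'o' 0 = c := by
          rw [PySem.Dict.getD_modify_of_ne]; exact gc; decide
        have e4 : (dct.modify 'a' 0 (· - 1)).getD 'a' 0 = d - 1 := by
          rw [PySem.Dict.getD_modify_self, gd]
        have h := ih (dct.modify 'a' 0 (· - 1)) a b c (d - 1) mx
          e1 e2 e3 e4 ha hb hc (by omega) (by omega)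
        rw [show (a + b + c + (d - 1) : Int) = a + b + c + d - 1 from by ring] at h
        exact h
    · simp only [frogLoopA, if_neg h1, if_neg h2, if_neg h3, if_neg h4, if_neg h5]
      rw [any_bad ch (by simp [h1, h2, h3, h4, h5])]
      simp

-- ===== VERDICT (by name: the statement is the Claim_ definition above) =====
theorem minNumberOfFrogs_spec : Claim_equal_minNumberOfFrogs := by
  intro s _
  unfold Spec_minNumberOfFrogs minNumberOfFrogs minNumberOfFrogs_alt
  have h := loop_eq s.toList
      (PySem.Dict.ofList [('c', 0), ('r', 0), ('o', 0), ('a', 0), ('k', 0)])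
      0 0 0 0 0 (by decide) (by decide) (by decide) (by decide)
      (by decide) (by decide) (by decide) (by decide) (by decide)
  simpa using h
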